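-- pv_equiv track=rewrite | github.com/runarmod/adventofcode | 2021/15/main.py | generate_big_grid
-- ===== SOURCE A (Python) =====
-- def generate_big_grid(data):
--     out = []
--     for y in range(5 * len(data)):
--         l = []
--         for x in range(5 * len(data)):
--             if x < len(data) and y < len(data):
--                 l.append(data[y][x])
--                 continue
--             if y < len(data):
--                 val = max(1, (l[x - len(data)] + 1) % 10)
--                 l.append(val)
--             else:
--                 val = max(1, (out[y - len(data)][x] + 1) % 10)
--                 l.append(val)
--         out.append(l)
--     return out
-- ===== SOURCE B (Python) =====
-- def generate_big_grid(data):
--     n = len(data)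
--     size = 5 * n
--     out = []
--     for y in range(size):
--         row = []
--         for x in range(size):
--             orig = data[y % n][x % n]
--             off = y // n + x // n
--             if off == 0:
--                 row.append(orig)
--             else:
--                 first = max(1, (orig + 1) % 10)
--                 row.append((first - 1 + off - 1) % 9 + 1)
--         out.append(row)
--     return out
-- ===== Notes on version B (the rewrite author's own statement) =====
-- stated objective: alternative
-- what changed: B replaces A's cell-by-cell propagation (each tile cell derived from a previously built cell of the growing output) with a direct per-cell closed form: value = orig for the top-left tile, otherwise ((max(1,(orig+1)%10)-1 + off-1) % 9) + 1 where off = y//n + x//n, so no constructed cell is ever read back.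
import Mathlib
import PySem

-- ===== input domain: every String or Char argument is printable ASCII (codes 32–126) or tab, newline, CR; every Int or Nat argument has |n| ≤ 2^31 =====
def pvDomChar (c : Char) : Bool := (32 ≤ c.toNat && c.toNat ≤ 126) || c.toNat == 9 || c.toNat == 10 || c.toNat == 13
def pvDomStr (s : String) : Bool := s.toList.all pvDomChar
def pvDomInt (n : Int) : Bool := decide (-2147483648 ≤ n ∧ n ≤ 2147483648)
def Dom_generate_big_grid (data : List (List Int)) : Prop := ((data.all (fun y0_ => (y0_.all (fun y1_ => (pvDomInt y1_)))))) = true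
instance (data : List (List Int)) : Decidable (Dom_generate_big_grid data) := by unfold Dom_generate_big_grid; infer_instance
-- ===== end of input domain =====

-- B replaces A's propagation from previously built cells by a per-cell closed form; alternative decomposition, no speed claim.

-- ===== PORT A =====
-- pyGetD defaults are never hit: Pre_ excludes exactly the inputs (a row shorter than the
-- number of rows) on which the Python raises IndexError; all other indices are in range.
def generate_big_grid (data : List (List Int)) : List (List Int) :=
  let n : Int := data.length
  (PySem.List.pyRange 0 (5 * n) 1).foldl (fun out y =>
    let l := (PySem.List.pyRange 0 (5 * n) 1).foldl (fun l x =>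
      if x < n ∧ y < n then
        l ++ [PySem.List.pyGetD (PySem.List.pyGetD data y []) x 0]
      else if y < n then
        l ++ [max 1 (PySem.Int.mod (PySem.List.pyGetD l (x - n) 0 + 1) 10)]
      else
        l ++ [max 1 (PySem.Int.mod (PySem.List.pyGetD (PySem.List.pyGetD out (y - n) []) x 0 + 1) 10)]) []
    out ++ [l]) []

-- ===== PORT B =====
def generate_big_grid_alt (data : List (List Int)) : List (List Int) :=
  let n : Int := data.length
  (PySem.List.pyRange 0 (5 * n) 1).foldl (fun out y =>
    let row := (PySem.List.pyRange 0 (5 * n) 1).foldl (fun row x =>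
      let orig := PySem.List.pyGetD (PySem.List.pyGetD data (PySem.Int.mod y n) []) (PySem.Int.mod x n) 0
      let off := PySem.Int.floordiv y n + PySem.Int.floordiv x n
      if off = 0 then row ++ [orig]
      else
        let first := max 1 (PySem.Int.mod (orig + 1) 10)
        row ++ [PySem.Int.mod (first - 1 + off - 1) 9 + 1]) []
    out ++ [row]) []

-- ===== PRECONDITION & SPEC =====
-- Pre_ excludes exactly the inputs on which the Python A raises IndexError:
-- a grid with some row shorter than the number of rows (B raises there too).
def Pre_generate_big_grid (data : List (List Int)) : Prop :=
  ∀ row ∈ data, data.length ≤ row.length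
instance (data : List (List Int)) : Decidable (Pre_generate_big_grid data) := by
  unfold Pre_generate_big_grid; infer_instance
def pvWitness_generate_big_grid : List (List Int) := [[1, 2], [9, 4]]

def Spec_generate_big_grid (data : List (List Int)) (out : List (List Int)) : Prop := out = generate_big_grid_alt data
instance (data : List (List Int)) (out : List (List Int)) : Decidable (Spec_generate_big_grid data out) := by unfold Spec_generate_big_grid; infer_instance

-- ===== CLAIM (what is proved, stated in full; the proofs are below) =====
def Claim_equal_generate_big_grid : Prop := ∀ (data : List (List Int)), Dom_generate_big_grid data → Pre_generate_big_grid data → Spec_generate_big_grid data (generate_big_grid data)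

-- ===== LEMMAS AND PROOFS =====

-- Python's increment max(1, (v+1) % 10)
def pyInc (v : Int) : Int := max 1 (PySem.Int.mod (v + 1) 10)

-- closed-form value of a cell whose first-tile value is o, after k increments
def cellOf (o : Int) (k : Nat) : Int :=
  if k = 0 then o else PySem.Int.mod (pyInc o - 1 + (k : Int) - 1) 9 + 1

-- the value B assigns to cell (y, x)
def cellB (data : List (List Int)) (y x : Nat) : Int :=
  cellOf ((data.getD (y % data.length) []).getD (x % data.length) 0)
    (y / data.length + x / data.length)

def rowB (data : List (List Int)) (y : Nat) : List Int :=
  (List.range (5 * data.length)).map (fun x => cellB data y x)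

def gridB (data : List (List Int)) : List (List Int) :=
  (List.range (5 * data.length)).map (rowB data)

theorem pyInc_bounds (v : Int) : 1 ≤ pyInc v ∧ pyInc v ≤ 9 := by
  unfold pyInc
  have h1 := PySem.Int.mod_nonneg (v + 1) (b := 10) (by norm_num)
  have h2 := PySem.Int.mod_lt (v + 1) (b := 10) (by norm_num)
  constructor <;> [exact le_max_left _ _; exact max_le (by norm_num) (by omega)]

theorem incr_closed (a : Int) : pyInc (a % 9 + 1) = (a + 1) % 9 + 1 := by
  unfold pyInc
  rw [PySem.Int.mod_eq_emod_of_pos (by norm_num), max_def]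
  split_ifs <;> omega

theorem cellOf_succ (o : Int) (k : Nat) : cellOf o (k + 1) = pyInc (cellOf o k) := by
  have hb := pyInc_bounds o
  rcases k with _ | j
  · simp only [cellOf]
    norm_num
    omega
  · simp only [cellOf]
    norm_num
    rw [incr_closed]
    have : pyInc o + ((j : Int) + 1) - 1 = pyInc o + (j : Int) - 1 + 1 := by ring
    rw [this]

theorem cellB_succ_x (data : List (List Int)) (x y : Nat)
    (hn : 0 < data.length) (hx : data.length ≤ x) :
    cellB data y x = pyInc (cellB data y (x - data.length)) := by
  unfold cellB
  rw [Nat.mod_eq_sub_mod hx, Nat.div_eq_sub_div hn hx,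
    (by omega : y / data.length + ((x - data.length) / data.length + 1)
      = (y / data.length + (x - data.length) / data.length) + 1), cellOf_succ]

theorem cellB_succ_y (data : List (List Int)) (x y : Nat)
    (hn : 0 < data.length) (hy : data.length ≤ y) :
    cellB data y x = pyInc (cellB data (y - data.length) x) := by
  unfold cellB
  rw [Nat.mod_eq_sub_mod hy, Nat.div_eq_sub_div hn hy,
    (by omega : (y - data.length) / data.length + 1 + x / data.length
      = ((y - data.length) / data.length + x / data.length) + 1), cellOf_succ]

theorem A_inner (data : List (List Int)) (out : List (List Int)) (y : Nat)
    (hy : y < 5 * data.length)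
    (hout : out = (List.range y).map (rowB data)) :
    ∀ k, k ≤ 5 * data.length →
      (PySem.List.pyRange 0 (k : Int) 1).foldl (fun l x =>
        if x < (data.length : Int) ∧ (y : Int) < (data.length : Int) then
          l ++ [PySem.List.pyGetD (PySem.List.pyGetD data (y : Int) []) x 0]
        else if (y : Int) < (data.length : Int) then
          l ++ [max 1 (PySem.Int.mod (PySem.List.pyGetD l (x - (data.length : Int)) 0 + 1) 10)]
        else
          l ++ [max 1 (PySem.Int.mod (PySem.List.pyGetD (PySem.List.pyGetD out ((y : Int) - (data.length : Int)) []) x 0 + 1) 10)]) []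
      = (List.range k).map (fun x => cellB data y x) := by
  intro k
  induction k with
  | zero => intro _; simp [PySem.List.pyRange_one_eq_nil]
  | succ k ih =>
    intro h
    have hr : PySem.List.pyRange 0 (((k + 1 : Nat)) : Int) 1
        = PySem.List.pyRange 0 (k : Int) 1 ++ [(k : Int)] := by
      push_cast
      exact PySem.List.pyRange_one_succ_right (by positivity)
    rw [hr, List.foldl_append, ih (by omega), List.range_succ, List.map_append,
      List.foldl_cons, List.foldl_nil]
    by_cases hyn : y < data.length
    · by_cases hxn : k < data.length
      · rw [if_pos ⟨by exact_mod_cast hxn, by exact_mod_cast hyn⟩]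
        have hcell : cellB data y k = (data.getD y []).getD k 0 := by
          unfold cellB cellOf
          rw [Nat.mod_eq_of_lt hyn, Nat.mod_eq_of_lt hxn,
            Nat.div_eq_of_lt hyn, Nat.div_eq_of_lt hxn]
          norm_num
        simp only [PySem.List.pyGetD_natCast, List.map_cons, List.map_nil, hcell]
      · have hnk : data.length ≤ k := Nat.le_of_not_lt hxn
        have hn0 : 0 < data.length := by omega
        rw [if_neg (by rintro ⟨h1, -⟩; exact hxn (by exact_mod_cast h1)),
          if_pos (by exact_mod_cast hyn), (Nat.cast_sub hnk).symm]
        simp only [PySem.List.pyGetD_natCast, List.map_cons, List.map_nil]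
        rw [PySem.List.getD_map_range _ _ _ _ (by omega : k - data.length < k),
          cellB_succ_x data k y hn0 hnk]
        rfl
    · have hny : data.length ≤ y := Nat.le_of_not_lt hyn
      have hn0 : 0 < data.length := by omega
      rw [if_neg (by rintro ⟨-, h2⟩; exact hyn (by exact_mod_cast h2)),
        if_neg (by exact_mod_cast hyn), hout, (Nat.cast_sub hny).symm]
      simp only [PySem.List.pyGetD_natCast, List.map_cons, List.map_nil]
      rw [PySem.List.getD_map_range _ _ _ _ (by omega : y - data.length < y)]
      simp only [rowB]
      rw [PySem.List.getD_map_range _ _ _ _ (by omega : k < 5 * data.length),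
        cellB_succ_y data k y hn0 hny]
      rfl

theorem A_outer (data : List (List Int)) :
    ∀ m, m ≤ 5 * data.length →
      (PySem.List.pyRange 0 (m : Int) 1).foldl (fun out y =>
        out ++ [(PySem.List.pyRange 0 (5 * (data.length : Int)) 1).foldl (fun l x =>
          if x < (data.length : Int) ∧ y < (data.length : Int) then
            l ++ [PySem.List.pyGetD (PySem.List.pyGetD data y []) x 0]
          else if y < (data.length : Int) then
            l ++ [max 1 (PySem.Int.mod (PySem.List.pyGetD l (x - (data.length : Int)) 0 + 1) 10)]
          else
            l ++ [max 1 (PySem.Int.mod (PySem.List.pyGetD (PySem.List.pyGetD out (y - (data.length : Int)) []) x 0 + 1) 10)]) []]) []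
      = (List.range m).map (rowB data) := by
  intro m
  induction m with
  | zero => intro _; simp [PySem.List.pyRange_one_eq_nil]
  | succ m ih =>
    intro h
    have hr : PySem.List.pyRange 0 (((m + 1 : Nat)) : Int) 1
        = PySem.List.pyRange 0 (m : Int) 1 ++ [(m : Int)] := by
      push_cast
      exact PySem.List.pyRange_one_succ_right (by positivity)
    rw [hr, List.foldl_append, ih (by omega), List.range_succ, List.map_append,
      List.foldl_cons, List.foldl_nil]
    have hinner := A_inner data ((List.range m).map (rowB data)) m (by omega) rfl
      (5 * data.length) (le_refl _)
    rw [show (((5 * data.length : Nat)) : Int) = 5 * (data.length : Int) from by push_cast; ring]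
      at hinner
    rw [hinner]
    rfl

theorem A_eq (data : List (List Int)) : generate_big_grid data = gridB data := by
  have h := A_outer data (5 * data.length) (le_refl _)
  rw [show (((5 * data.length : Nat)) : Int) = 5 * (data.length : Int) from by push_cast; ring]
    at h
  exact h

theorem B_inner (data : List (List Int)) (y : Nat) :
    ∀ k : Nat, (PySem.List.pyRange 0 (k : Int) 1).foldl (fun row x =>
      if PySem.Int.floordiv (y : Int) (data.length : Int)
          + PySem.Int.floordiv x (data.length : Int) = 0 then
        row ++ [PySem.List.pyGetD (PySem.List.pyGetD data
          (PySem.Int.mod (y : Int) (data.length : Int)) [])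
          (PySem.Int.mod x (data.length : Int)) 0]
      else
        row ++ [PySem.Int.mod (max 1 (PySem.Int.mod (PySem.List.pyGetD
          (PySem.List.pyGetD data (PySem.Int.mod (y : Int) (data.length : Int)) [])
          (PySem.Int.mod x (data.length : Int)) 0 + 1) 10) - 1
          + (PySem.Int.floordiv (y : Int) (data.length : Int)
            + PySem.Int.floordiv x (data.length : Int)) - 1) 9 + 1]) []
    = (List.range k).map (fun x => cellB data y x) := by
  intro k
  induction k with
  | zero => simp [PySem.List.pyRange_one_eq_nil]
  | succ k ih =>
    have hr : PySem.List.pyRange 0 (((k + 1 : Nat)) : Int) 1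
        = PySem.List.pyRange 0 (k : Int) 1 ++ [(k : Int)] := by
      push_cast
      exact PySem.List.pyRange_one_succ_right (by positivity)
    rw [hr, List.foldl_append, ih, List.range_succ, List.map_append,
      List.foldl_cons, List.foldl_nil]
    simp only [PySem.Int.floordiv_natCast, PySem.Int.mod_natCast, PySem.List.pyGetD_natCast]
    rw [show (((y / data.length : Nat)) : Int) + ((k / data.length : Nat) : Int)
        = (((y / data.length + k / data.length : Nat)) : Int) from by push_cast; ring]
    by_cases hz : y / data.length + k / data.length = 0
    · rw [if_pos (by exact_mod_cast hz)]
      simp only [List.map_cons, List.map_nil]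
      have hcell : cellB data y k
          = (data.getD (y % data.length) []).getD (k % data.length) 0 := by
        unfold cellB
        rw [hz]
        rfl
      rw [hcell]
    · rw [if_neg (by exact_mod_cast hz)]
      simp only [List.map_cons, List.map_nil]
      have hcell : cellB data y k
          = PySem.Int.mod (pyInc ((data.getD (y % data.length) []).getD (k % data.length) 0)
              - 1 + ((y / data.length + k / data.length : Nat) : Int) - 1) 9 + 1 := by
        unfold cellB cellOf
        rw [if_neg hz]
      rw [hcell]
      unfold pyInc
      rfl

theorem B_eq (data : List (List Int)) : generate_big_grid_alt data = gridB data := by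
  have houter : ∀ m : Nat,
      (PySem.List.pyRange 0 (m : Int) 1).foldl (fun out y =>
        out ++ [(PySem.List.pyRange 0 (5 * (data.length : Int)) 1).foldl (fun row x =>
          if PySem.Int.floordiv y (data.length : Int)
              + PySem.Int.floordiv x (data.length : Int) = 0 then
            row ++ [PySem.List.pyGetD (PySem.List.pyGetD data
              (PySem.Int.mod y (data.length : Int)) [])
              (PySem.Int.mod x (data.length : Int)) 0]
          else
            row ++ [PySem.Int.mod (max 1 (PySem.Int.mod (PySem.List.pyGetD
              (PySem.List.pyGetD data (PySem.Int.mod y (data.length : Int)) [])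
              (PySem.Int.mod x (data.length : Int)) 0 + 1) 10) - 1
              + (PySem.Int.floordiv y (data.length : Int)
                + PySem.Int.floordiv x (data.length : Int)) - 1) 9 + 1]) []]) []
      = (List.range m).map (rowB data) := by
    intro m
    induction m with
    | zero => simp [PySem.List.pyRange_one_eq_nil]
    | succ m ih =>
      have hr : PySem.List.pyRange 0 (((m + 1 : Nat)) : Int) 1
          = PySem.List.pyRange 0 (m : Int) 1 ++ [(m : Int)] := by
        push_cast
        exact PySem.List.pyRange_one_succ_right (by positivity)
      rw [hr, List.foldl_append, ih, List.range_succ, List.map_append,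
        List.foldl_cons, List.foldl_nil]
      have hinner := B_inner data m (5 * data.length)
      rw [show (((5 * data.length : Nat)) : Int) = 5 * (data.length : Int) from by push_cast; ring]
        at hinner
      rw [hinner]
      rfl
  have h := houter (5 * data.length)
  rw [show (((5 * data.length : Nat)) : Int) = 5 * (data.length : Int) from by push_cast; ring]
    at h
  exact h

-- ===== VERDICT (by name: the statement is the Claim_ definition above) =====
theorem generate_big_grid_spec : Claim_equal_generate_big_grid := by
  intro data _ _
  unfold Spec_generate_big_grid
  rw [A_eq, B_eq]
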